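-- pv_equiv track=rewrite | github.com/pypi-data/pypi-mirror-161 | packages/mylib-donghao/mylib_donghao-0.2.1.tar.gz/mylib_donghao-0.2.1/mylib_donghao/basic_function.py | range_split
-- ===== SOURCE A (Python) =====
-- import math
--
-- def range_split(a, b, n):
--     k = (b-a)/n
--     k = math.floor(k)
--     u = []
--     t = a
--     for i in range(n-1):
--         u.append([t, t+k])
--         t += k
--     u.append([t, b])
--     return u
-- ===== SOURCE B (Python) =====
-- import math
--
-- def range_split(a, b, n):
--     # Divide and conquer: split the block of sub-intervals in half and recurse,
--     # appending the intervals of each half into a shared output list.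
--     k = math.floor((b - a) / n)
--     out = []
--     _chop(a, b, n, k, out)
--     return out
--
-- def _chop(lo, hi, parts, k, out):
--     if parts <= 1:
--         out.append([lo, hi])
--         return
--     h = parts // 2
--     mid = lo + h * k
--     _chop(lo, mid, h, k, out)
--     _chop(mid, hi, parts - h, k, out)
-- ===== Notes on version B (the rewrite author's own statement) =====
-- stated objective: alternative
-- what changed: Replaced the linear append-loop carrying a running endpoint by a divide-and-conquer recursion that halves the block of sub-intervals and appends each half's intervals to a shared output list; Pre_ excludes only n = 0, where both programs raise ZeroDivisionError.
import Mathlib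
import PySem

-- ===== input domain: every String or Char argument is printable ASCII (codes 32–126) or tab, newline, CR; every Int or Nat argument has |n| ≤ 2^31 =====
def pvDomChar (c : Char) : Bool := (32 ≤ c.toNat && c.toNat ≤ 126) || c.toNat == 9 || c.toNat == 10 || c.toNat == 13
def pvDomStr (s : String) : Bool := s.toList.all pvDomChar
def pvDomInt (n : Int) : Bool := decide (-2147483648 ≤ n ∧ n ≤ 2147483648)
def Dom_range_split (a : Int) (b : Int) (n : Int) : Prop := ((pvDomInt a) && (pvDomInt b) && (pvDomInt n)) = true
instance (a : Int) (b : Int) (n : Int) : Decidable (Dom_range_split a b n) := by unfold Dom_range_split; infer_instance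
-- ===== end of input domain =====

-- B replaces A's linear append-loop by a divide-and-conquer recursion halving the block of sub-intervals (objective: alternative, same cost).
-- math.floor((b-a)/n) on |a|,|b|,|n| ≤ 2^31 equals integer floor division (the float quotient of such ints never crosses an integer), so both ports use PySem.Int.floordiv.

-- ===== PORT A =====
def range_split (a : Int) (b : Int) (n : Int) : List (List Int) :=
  let k := PySem.Int.floordiv (b - a) n
  let st := (PySem.List.pyRange 0 (n - 1) 1).foldl
    (fun (s : List (List Int) × Int) _i => (s.1 ++ [[s.2, s.2 + k]], s.2 + k)) ([], a)
  st.1 ++ [[st.2, b]]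

-- ===== PORT B =====
-- Source B's _chop; the Nat fuel only makes the recursion structural (it never changes the result:
-- the recursion depth is bounded by parts, and fuel = parts.toNat + 1 at the call site).
def chopB (fuel : Nat) (lo : Int) (hi : Int) (parts : Int) (k : Int) (out : List (List Int)) : List (List Int) :=
  match fuel with
  | 0 => out ++ [[lo, hi]]
  | fuel + 1 =>
    if parts ≤ 1 then out ++ [[lo, hi]]
    else
      let h := PySem.Int.floordiv parts 2
      let mid := lo + h * k
      chopB fuel mid hi (parts - h) k (chopB fuel lo mid h k out)

def range_split_alt (a : Int) (b : Int) (n : Int) : List (List Int) :=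
  let k := PySem.Int.floordiv (b - a) n
  chopB (n.toNat + 1) a b n k []

-- ===== PRECONDITION & SPEC =====
-- Pre_ excludes exactly n = 0, where Python A raises ZeroDivisionError (so does B).
def Pre_range_split (a : Int) (b : Int) (n : Int) : Prop := n ≠ 0
instance (a : Int) (b : Int) (n : Int) : Decidable (Pre_range_split a b n) := by unfold Pre_range_split; infer_instance
def pvWitness_range_split : Int × Int × Int := (0, 10, 3)

def Spec_range_split (a : Int) (b : Int) (n : Int) (out : List (List Int)) : Prop := out = range_split_alt a b n
instance (a : Int) (b : Int) (n : Int) (out : List (List Int)) : Decidable (Spec_range_split a b n out) := by unfold Spec_range_split; infer_instance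

-- ===== CLAIM (what is proved, stated in full; the proofs are below) =====
def Claim_equal_range_split : Prop := ∀ (a : Int) (b : Int) (n : Int), Dom_range_split a b n → Pre_range_split a b n → Spec_range_split a b n (range_split a b n)

-- ===== LEMMAS AND PROOFS =====

-- A's loop in closed form.
theorem foldA (k : Int) (m : Nat) (u0 : List (List Int)) (t0 : Int) :
    (PySem.List.pyRange 0 (m : Int) 1).foldl
      (fun (s : List (List Int) × Int) _i => (s.1 ++ [[s.2, s.2 + k]], s.2 + k)) (u0, t0)
    = (u0 ++ (List.range m).map (fun i : Nat => [t0 + (i : Int) * k, t0 + ((i : Int) + 1) * k]), t0 + (m : Int) * k) := by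
  induction m generalizing u0 t0 with
  | zero => simp
  | succ m ih =>
    rw [show ((m + 1 : Nat) : Int) = (m : Int) + 1 by push_cast; ring,
      PySem.List.pyRange_one_succ_right (by positivity), List.foldl_append, ih]
    simp [List.range_succ]
    ring

-- B's divide-and-conquer in the same closed form, by strong induction on the block size.
theorem chopB_closed (fuel : Nat) : ∀ (parts lo hi k : Int) (out : List (List Int)) (m : Nat), (parts - 1).toNat = m → m < fuel →
    chopB fuel lo hi parts k out
    = out ++ ((List.range m).map (fun i : Nat => [lo + (i : Int) * k, lo + ((i : Int) + 1) * k]) ++ [[lo + (m : Int) * k, hi]]) := by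
  induction fuel with
  | zero => intro _ _ _ _ _ _ _ hf; omega
  | succ fuel ih =>
    intro parts lo hi k out m hm hf
    rw [chopB]
    by_cases hle : parts ≤ 1
    · have : m = 0 := by omega
      simp [hle, this]
    · have h2 : 2 ≤ parts := by omega
      have hdiv := PySem.Int.floordiv_eq_ediv_of_pos (a := parts) (b := 2) (by omega)
      set h := PySem.Int.floordiv parts 2 with hh
      have hb : 1 ≤ h ∧ h ≤ parts - 1 := by omega
      rw [if_neg hle]
      show chopB fuel (lo + h * k) hi (parts - h) k (chopB fuel lo (lo + h * k) h k out) = _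
      rw [ih h lo (lo + h * k) k out (h - 1).toNat rfl (by omega),
        ih (parts - h) (lo + h * k) hi k _ (parts - h - 1).toNat rfl (by omega),
        List.append_assoc]
      congr 1
      rw [← List.append_assoc]
      set ml := (h - 1).toNat
      set mr := (parts - h - 1).toNat
      have hhml : (h : Int) = (ml : Int) + 1 := by omega
      have hsum : ml + 1 + mr = m := by omega
      have hlast : ([[lo + (ml : Int) * k, lo + h * k]] : List (List Int))
            = List.map (fun i : Nat => [lo + (i : Int) * k, lo + ((i : Int) + 1) * k]) [ml] := by
        have h1 : lo + h * k = lo + ((ml : Int) + 1) * k := by rw [hhml]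
        rw [h1]; rfl
      rw [hlast, ← List.map_append, ← List.range_succ]
      have hshift : (List.range mr).map
            (fun i : Nat => [lo + h * k + (i : Int) * k, lo + h * k + ((i : Int) + 1) * k])
          = (List.range mr).map
            ((fun i : Nat => [lo + (i : Int) * k, lo + ((i : Int) + 1) * k]) ∘ (fun i => ml + 1 + i)) := by
        refine List.map_congr_left (fun i _ => ?_)
        show [lo + h * k + (i : Int) * k, lo + h * k + ((i : Int) + 1) * k]
            = [lo + ((ml + 1 + i : Nat) : Int) * k, lo + (((ml + 1 + i : Nat) : Int) + 1) * k]
        have e1 : lo + ((ml + 1 + i : Nat) : Int) * k = lo + h * k + (i : Int) * k := by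
          push_cast; rw [hhml]; ring
        have e2 : lo + (((ml + 1 + i : Nat) : Int) + 1) * k = lo + h * k + ((i : Int) + 1) * k := by
          push_cast; rw [hhml]; ring
        rw [e1, e2]
      have hy : ([[lo + h * k + (mr : Int) * k, hi]] : List (List Int)) = [[lo + (m : Int) * k, hi]] := by
        have e3 : lo + h * k + (mr : Int) * k = lo + (m : Int) * k := by
          rw [← hsum]; push_cast; rw [hhml]; ring
        rw [e3]
      rw [hshift, hy, ← List.map_map, ← List.map_append, Nat.succ_eq_add_one, ← List.range_add, hsum]

theorem pyRange_toNat (m : Int) :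
    PySem.List.pyRange 0 m 1 = PySem.List.pyRange 0 ((m.toNat : Int)) 1 := by
  by_cases h : 0 ≤ m
  · rw [Int.toNat_of_nonneg h]
  · rw [PySem.List.pyRange_one_eq_nil (by omega), PySem.List.pyRange_one_eq_nil (by omega)]

-- ===== VERDICT (by name: the statement is the Claim_ definition above) =====
theorem range_split_spec : Claim_equal_range_split := by
  intro a b n _ _
  simp only [Spec_range_split, range_split, range_split_alt]
  set k := PySem.Int.floordiv (b - a) n with hk
  set m := (n - 1).toNat with hm
  rw [pyRange_toNat, foldA, chopB_closed (n.toNat + 1) n a b k [] m hm.symm (by omega)]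
  rfl
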